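-- pv_equiv track=rewrite | github.com/Sinua/facto.py | facto/facto.py | coefficients_to_decimal
-- ===== SOURCE A (Python) =====
-- def coefficients_to_decimal(coefficients):
--     decimal = 0
--     factorial = 1
--     for i in range(1, len(coefficients) + 1):
--         if coefficients[-1 * i] > i:
--             raise ValueError('Coefficient can\'t be larger than the base at the digit')
--         factorial *= i
--         decimal += coefficients[-1 * i] * factorial
--     return decimal
-- ===== SOURCE B (Python) =====
-- def coefficients_to_decimal(coefficients):
--     acc = 0
--     p = len(coefficients)
--     for c in coefficients:
--         if c > p:
--             raise ValueError('Coefficient can\'t be larger than the base at the digit')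
--         acc = acc * (p + 1) + c
--         p -= 1
--     return acc
-- ===== Notes on version B (the rewrite author's own statement) =====
-- stated objective: alternative
-- what changed: Replaces A's least-significant-first weighted sum with an explicitly tracked running factorial by a most-significant-first Horner evaluation (acc = acc*(p+1) + c), iterating the list directly instead of indexing from the end over range().
import Mathlib
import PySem

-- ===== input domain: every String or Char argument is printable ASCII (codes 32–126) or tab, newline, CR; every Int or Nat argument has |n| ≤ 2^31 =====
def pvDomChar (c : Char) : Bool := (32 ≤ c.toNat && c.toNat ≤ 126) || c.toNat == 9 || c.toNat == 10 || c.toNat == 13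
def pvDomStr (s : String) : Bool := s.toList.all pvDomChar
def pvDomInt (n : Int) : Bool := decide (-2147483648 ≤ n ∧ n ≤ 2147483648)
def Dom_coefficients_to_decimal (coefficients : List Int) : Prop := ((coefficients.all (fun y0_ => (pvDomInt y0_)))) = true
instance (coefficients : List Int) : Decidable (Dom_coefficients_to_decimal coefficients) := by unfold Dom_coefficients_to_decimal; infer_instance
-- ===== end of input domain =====

-- B evaluates the factorial-base number by Horner's rule, most-significant digit first,
-- instead of A's least-significant-first weighted sum with an explicit running factorial.

-- ===== PORT A =====
def coefficients_to_decimal (coefficients : List Int) : Int :=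
  ((PySem.List.pyRange 1 ((coefficients.length : Int) + 1) 1).foldl
    (fun (st : Int × Int) i =>
      let c := PySem.List.pyGetD coefficients (-1 * i) 0
      if c > i then st   -- Python raises ValueError here; excluded by Pre_
      else (st.1 + c * (st.2 * i), st.2 * i))
    (0, 1)).1

-- ===== PORT B =====
def coefficients_to_decimal_alt (coefficients : List Int) : Int :=
  (coefficients.foldl
    (fun (st : Int × Int) c =>
      if c > st.2 then st   -- Python raises ValueError here; excluded by Pre_
      else (st.1 * (st.2 + 1) + c, st.2 - 1))
    (0, (coefficients.length : Int))).1

-- ===== PRECONDITION & SPEC =====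
-- Pre_ excludes exactly the inputs on which A (and B) raise ValueError:
-- some coefficient exceeds the base at its digit (coefficients[j] > len - j).
def Pre_coefficients_to_decimal (coefficients : List Int) : Prop :=
  ∀ j ∈ List.range coefficients.length,
    coefficients.getD j 0 ≤ (coefficients.length : Int) - (j : Int)
instance (coefficients : List Int) : Decidable (Pre_coefficients_to_decimal coefficients) := by
  unfold Pre_coefficients_to_decimal; infer_instance
def pvWitness_coefficients_to_decimal : List Int := [1, 2, 1, 0]

def Spec_coefficients_to_decimal (coefficients : List Int) (out : Int) : Prop := out = coefficients_to_decimal_alt coefficients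
instance (coefficients : List Int) (out : Int) : Decidable (Spec_coefficients_to_decimal coefficients out) := by unfold Spec_coefficients_to_decimal; infer_instance

-- ===== CLAIM (what is proved, stated in full; the proofs are below) =====
def Claim_equal_coefficients_to_decimal : Prop := ∀ (coefficients : List Int), Dom_coefficients_to_decimal coefficients → Pre_coefficients_to_decimal coefficients → Spec_coefficients_to_decimal coefficients (coefficients_to_decimal coefficients)

-- ===== LEMMAS AND PROOFS =====

def pvFac : Nat → Int
  | 0 => 1
  | n + 1 => pvFac n * ((n : Int) + 1)

theorem pre_cons_head {c : Int} {t : List Int}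
    (h : Pre_coefficients_to_decimal (c :: t)) : c ≤ (t.length : Int) + 1 := by
  have := h 0 (by simp)
  simpa using this

theorem pre_cons_tail {c : Int} {t : List Int}
    (h : Pre_coefficients_to_decimal (c :: t)) : Pre_coefficients_to_decimal t := by
  intro j hj
  have hj' : j < t.length := List.mem_range.mp hj
  have := h (j + 1) (by simp; omega)
  simp [List.getD] at this ⊢
  omega

-- B's fold is linear in its accumulator (Horner linearity).
theorem b_lin : ∀ (t : List Int) (a : Int), Pre_coefficients_to_decimal t →
    ((t.foldl (fun (st : Int × Int) c =>
        if c > st.2 then st else (st.1 * (st.2 + 1) + c, st.2 - 1))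
      (a, (t.length : Int))).1
      = a * pvFac (t.length + 1)
        + ((t.foldl (fun (st : Int × Int) c =>
            if c > st.2 then st else (st.1 * (st.2 + 1) + c, st.2 - 1))
          (0, (t.length : Int))).1)) := by
  intro t
  induction t with
  | nil => intro a _; simp [pvFac]
  | cons c t' ih =>
    intro a h
    have hc : c ≤ (t'.length : Int) + 1 := pre_cons_head h
    have ht' := pre_cons_tail h
    have hnot : ¬ (c > ((t'.length : Int) + 1)) := by omega
    simp only [List.foldl_cons, List.length_cons]
    push_cast
    rw [if_neg hnot, if_neg (by simpa using hnot)]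
    have e1 : ((t'.length : Int) + 1 - 1) = (t'.length : Int) := by ring
    simp only [zero_mul, zero_add, e1]
    rw [ih (a * ((t'.length : Int) + 1 + 1) + c) ht', ih c ht']
    show _ = a * pvFac (t'.length + 1 + 1) + _
    simp only [pvFac]
    push_cast
    ring

theorem b_cons {c : Int} {t : List Int} (h : Pre_coefficients_to_decimal (c :: t)) :
    coefficients_to_decimal_alt (c :: t)
      = coefficients_to_decimal_alt t + c * pvFac (t.length + 1) := by
  have hc : c ≤ (t.length : Int) + 1 := pre_cons_head h
  have ht := pre_cons_tail h
  unfold coefficients_to_decimal_alt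
  simp only [List.foldl_cons, List.length_cons]
  push_cast
  rw [if_neg (by omega)]
  have e1 : ((t.length : Int) + 1 - 1) = (t.length : Int) := by ring
  simp only [zero_mul, zero_add, e1]
  rw [b_lin t c ht]
  ring

-- negative indexing into a cons cell, in A's loop range, ignores the head
theorem pyGetD_neg_cons (c : Int) (t : List Int) (i : Int)
    (h1 : 1 ≤ i) (h2 : i ≤ (t.length : Int)) :
    PySem.List.pyGetD (c :: t) (-1 * i) 0 = PySem.List.pyGetD t (-1 * i) 0 := by
  have hk : i = ((i.toNat : Nat) : Int) := by omega
  have h1' : 0 < i.toNat := by omega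
  have h2' : i.toNat ≤ t.length := by omega
  rw [show (-1 * i) = -((i.toNat : Nat) : Int) by omega]
  rw [PySem.List.pyGetD_neg_natCast (xs := c :: t) (k := i.toNat) (d := 0)
        h1' (by simp; omega),
      PySem.List.pyGetD_neg_natCast (xs := t) (k := i.toNat) (d := 0) h1' h2']
  have : (c :: t).length - i.toNat = (t.length - i.toNat) + 1 := by
    simp; omega
  simp only [this, List.getElem_cons_succ]

-- the main A-side characterisation: A's state is (B's value, factorial)
theorem a_main : ∀ (cs : List Int), Pre_coefficients_to_decimal cs →
    ((PySem.List.pyRange 1 ((cs.length : Int) + 1) 1).foldl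
      (fun (st : Int × Int) i =>
        let c := PySem.List.pyGetD cs (-1 * i) 0
        if c > i then st else (st.1 + c * (st.2 * i), st.2 * i))
      (0, 1))
      = (coefficients_to_decimal_alt cs, pvFac cs.length) := by
  intro cs
  induction cs with
  | nil =>
    intro _
    rw [PySem.List.pyRange_one_eq_nil (by simp)]
    simp [coefficients_to_decimal_alt, pvFac]
  | cons c t ih =>
    intro h
    have hc : c ≤ (t.length : Int) + 1 := pre_cons_head h
    have ht := pre_cons_tail h
    have hsplit : PySem.List.pyRange 1 (((c :: t).length : Int) + 1) 1
        = PySem.List.pyRange 1 ((t.length : Int) + 1) 1 ++ [((t.length : Int) + 1)] := by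
      have := PySem.List.pyRange_one_succ_right (a := 1) (b := (t.length : Int) + 1)
        (by omega)
      simpa using this
    rw [hsplit, List.foldl_append]
    have hcongr : (PySem.List.pyRange 1 ((t.length : Int) + 1) 1).foldl
        (fun (st : Int × Int) i =>
          let x := PySem.List.pyGetD (c :: t) (-1 * i) 0
          if x > i then st else (st.1 + x * (st.2 * i), st.2 * i))
        (0, 1)
        = (PySem.List.pyRange 1 ((t.length : Int) + 1) 1).foldl
        (fun (st : Int × Int) i =>
          let x := PySem.List.pyGetD t (-1 * i) 0
          if x > i then st else (st.1 + x * (st.2 * i), st.2 * i))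
        (0, 1) := by
      apply PySem.List.foldl_congr_mem
      intro acc i hi
      have hmem := (PySem.List.mem_pyRange_one).mp hi
      have := pyGetD_neg_cons c t i hmem.1 (by omega)
      simp only [this]
    rw [hcongr, ih ht]
    simp only [List.foldl_cons, List.foldl_nil]
    -- last step: i = length t + 1, accesses the head c
    have hgetc : PySem.List.pyGetD (c :: t) (-1 * ((t.length : Int) + 1)) 0 = c := by
      rw [show (-1 * ((t.length : Int) + 1)) = -(((t.length + 1 : Nat) : Nat) : Int) by
            push_cast; ring]
      rw [PySem.List.pyGetD_neg_natCast (xs := c :: t) (k := t.length + 1) (d := 0)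
            (by omega) (by simp)]
      simp
    simp only [hgetc]
    rw [if_neg (by omega)]
    rw [b_cons h]
    simp only [List.length_cons, pvFac]

-- ===== VERDICT (by name: the statement is the Claim_ definition above) =====
theorem coefficients_to_decimal_spec : Claim_equal_coefficients_to_decimal := by
  intro cs _ hpre
  unfold Spec_coefficients_to_decimal coefficients_to_decimal
  rw [a_main cs hpre]
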